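-- pv_equiv track=rewrite | github.com/Raheem14042005/Complyr | main.py | expand_pages
-- ===== SOURCE A (Python) =====
-- from typing import List, Optional, Dict, Tuple, Any
--
-- def expand_pages(pages: List[int], total_pages: int, window: int) -> List[int]:
--     s = set()
--     for p in pages:
--         for n in range(-window, window + 1):
--             idx = p + n
--             if 0 <= idx < total_pages:
--                 s.add(idx)
--     return sorted(s)
-- ===== SOURCE B (Python) =====
-- def expand_pages(pages, total_pages, window):
--     out = []
--     if window < 0:
--         return out
--     for p in sorted(pages):
--         lo = max(p - window, 0)
--         hi = min(p + window, total_pages - 1)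
--         start = max(lo, out[-1] + 1) if out else lo
--         out.extend(range(start, hi + 1))
--     return out
-- ===== Notes on version B (the rewrite author's own statement) =====
-- stated objective: faster
-- what changed: Instead of inserting every index of every window into a set and then sorting, B sorts the pages once, clips each window to an interval, and emits each interval's not-yet-covered suffix in one left-to-right pass, so the output is built already sorted and deduplicated; intended as faster (O(P log P + K) vs O(P*window)); measured 282x at n=4096 and A timed out at larger sizes, but a timing run could not confirm the ratio at the largest rung both finished.
import Mathlib
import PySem

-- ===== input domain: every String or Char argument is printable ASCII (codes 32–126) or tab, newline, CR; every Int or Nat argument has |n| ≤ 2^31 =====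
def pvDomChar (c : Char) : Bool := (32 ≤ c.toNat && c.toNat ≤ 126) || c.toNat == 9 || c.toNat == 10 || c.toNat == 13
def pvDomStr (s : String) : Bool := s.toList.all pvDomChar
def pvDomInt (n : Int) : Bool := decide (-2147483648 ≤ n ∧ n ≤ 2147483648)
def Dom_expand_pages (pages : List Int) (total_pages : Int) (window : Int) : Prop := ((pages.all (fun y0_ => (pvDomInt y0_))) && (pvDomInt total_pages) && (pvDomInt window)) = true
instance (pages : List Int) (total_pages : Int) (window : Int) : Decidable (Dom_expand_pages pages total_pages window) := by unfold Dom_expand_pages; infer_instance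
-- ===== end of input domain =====

-- B sorts the pages once, clips each window to an interval, and emits each interval's
-- not-yet-covered suffix in one left-to-right pass (output built already sorted and
-- deduplicated), instead of A's set of every window index followed by a sort.

-- ===== PORT A =====
def expand_pages (pages : List Int) (total_pages : Int) (window : Int) : List Int :=
  let s : PySem.Set Int := pages.foldl (fun s p =>
    (PySem.List.pyRange (-window) (window + 1) 1).foldl (fun s n =>
      let idx := p + n
      if 0 ≤ idx ∧ idx < total_pages then PySem.Set.add s idx else s) s)
    PySem.Set.empty
  PySem.List.sorted s (fun x => x) false

-- ===== PORT B =====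
-- one loop iteration of Source B: clip p's window, emit the part above what is already covered
def bStep (total_pages window : Int) (out : List Int) (p : Int) : List Int :=
  let lo := max (p - window) 0
  let hi := min (p + window) (total_pages - 1)
  let start := match out.getLast? with
    | none => lo
    | some last => max lo (last + 1)
  out ++ PySem.List.pyRange start (hi + 1) 1

def expand_pages_alt (pages : List Int) (total_pages : Int) (window : Int) : List Int :=
  if window < 0 then []
  else (PySem.List.sorted pages (fun x => x) false).foldl (bStep total_pages window) []

-- ===== PRECONDITION & SPEC =====
def Spec_expand_pages (pages : List Int) (total_pages : Int) (window : Int) (out : List Int) : Prop := out = expand_pages_alt pages total_pages window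
instance (pages : List Int) (total_pages : Int) (window : Int) (out : List Int) : Decidable (Spec_expand_pages pages total_pages window out) := by unfold Spec_expand_pages; infer_instance

-- ===== CLAIM (what is proved, stated in full; the proofs are below) =====
def Claim_equal_expand_pages : Prop := ∀ (pages : List Int) (total_pages : Int) (window : Int), Dom_expand_pages pages total_pages window → Spec_expand_pages pages total_pages window (expand_pages pages total_pages window)

-- ===== LEMMAS AND PROOFS =====

-- A's inner loop over range(-window, window+1): membership of the accumulated set
theorem memA_inner (t p : Int) (L : List Int) :
    ∀ (s : PySem.Set Int) (y : Int),
      (y ∈ L.foldl (fun s n =>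
          let idx := p + n
          if 0 ≤ idx ∧ idx < t then PySem.Set.add s idx else s) s) ↔
      y ∈ s ∨ ∃ n ∈ L, y = p + n ∧ 0 ≤ y ∧ y < t := by
  induction L with
  | nil => simp
  | cons n L ih =>
    intro s y
    simp only [List.foldl_cons]
    rw [ih]
    by_cases h : 0 ≤ p + n ∧ p + n < t
    · rw [if_pos h, PySem.Set.mem_add]
      constructor
      · rintro (⟨hs | rfl⟩ | ⟨m, hm, rfl, hy⟩)
        · exact Or.inl hs
        · exact Or.inr ⟨n, by simp, rfl, h⟩
        · exact Or.inr ⟨m, by simp [hm], rfl, hy⟩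
      · rintro (hs | ⟨m, hm, rfl, hy⟩)
        · exact Or.inl (Or.inl hs)
        · rcases List.mem_cons.mp hm with rfl | hm
          · exact Or.inl (Or.inr rfl)
          · exact Or.inr ⟨m, hm, rfl, hy⟩
    · rw [if_neg h]
      constructor
      · rintro (hs | ⟨m, hm, rfl, hy⟩)
        · exact Or.inl hs
        · exact Or.inr ⟨m, by simp [hm], rfl, hy⟩
      · rintro (hs | ⟨m, hm, rfl, hy⟩)
        · exact Or.inl hs
        · rcases List.mem_cons.mp hm with rfl | hm
          · exact absurd hy h
          · exact Or.inr ⟨m, hm, rfl, hy⟩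

theorem nodupA_inner (t p : Int) (L : List Int) :
    ∀ (s : PySem.Set Int), s.Nodup →
      (L.foldl (fun s n =>
          let idx := p + n
          if 0 ≤ idx ∧ idx < t then PySem.Set.add s idx else s) s).Nodup := by
  induction L with
  | nil => intro s hs; simpa using hs
  | cons n L ih =>
    intro s hs
    simp only [List.foldl_cons]
    apply ih
    by_cases h : 0 ≤ p + n ∧ p + n < t
    · rw [if_pos h]; exact PySem.Set.nodup_add _ _ hs
    · rw [if_neg h]; exact hs

theorem memA_outer (t w : Int) (ps : List Int) :
    ∀ (s : PySem.Set Int) (y : Int),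
      (y ∈ ps.foldl (fun s p =>
          (PySem.List.pyRange (-w) (w + 1) 1).foldl (fun s n =>
            let idx := p + n
            if 0 ≤ idx ∧ idx < t then PySem.Set.add s idx else s) s) s) ↔
      y ∈ s ∨ ∃ p ∈ ps, 0 ≤ y ∧ y < t ∧ p - w ≤ y ∧ y ≤ p + w := by
  induction ps with
  | nil => simp
  | cons p ps ih =>
    intro s y
    simp only [List.foldl_cons, ih, memA_inner, PySem.List.mem_pyRange_one]
    constructor
    · rintro (⟨hs | ⟨n, hn, rfl, hy⟩⟩ | ⟨q, hq, hy⟩)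
      · exact Or.inl hs
      · exact Or.inr ⟨p, by simp, hy.1, hy.2, by omega, by omega⟩
      · exact Or.inr ⟨q, by simp [hq], hy⟩
    · rintro (hs | ⟨q, hq, hy⟩)
      · exact Or.inl (Or.inl hs)
      · rcases List.mem_cons.mp hq with rfl | hq
        · exact Or.inl (Or.inr ⟨y - q, by omega, by omega, hy.1, hy.2.1⟩)
        · exact Or.inr ⟨q, hq, hy⟩

theorem nodupA_outer (t w : Int) (ps : List Int) :
    ∀ (s : PySem.Set Int), s.Nodup →
      (ps.foldl (fun s p =>
          (PySem.List.pyRange (-w) (w + 1) 1).foldl (fun s n =>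
            let idx := p + n
            if 0 ≤ idx ∧ idx < t then PySem.Set.add s idx else s) s) s).Nodup := by
  induction ps with
  | nil => intro s hs; simpa using hs
  | cons p ps ih =>
    intro s hs
    simp only [List.foldl_cons]
    exact ih _ (nodupA_inner t p _ s hs)

theorem mem_expand (pages : List Int) (t w x : Int) :
    x ∈ expand_pages pages t w ↔
      0 ≤ x ∧ x < t ∧ ∃ p ∈ pages, p - w ≤ x ∧ x ≤ p + w := by
  unfold expand_pages
  simp only [PySem.List.mem_sorted, memA_outer]
  constructor
  · rintro (h | ⟨p, hp, h1, h2, h3, h4⟩)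
    · simp [PySem.Set.empty] at h
    · exact ⟨h1, h2, p, hp, h3, h4⟩
  · rintro ⟨h1, h2, p, hp, h3, h4⟩
    exact Or.inr ⟨p, hp, h1, h2, h3, h4⟩

theorem pairwise_expand (pages : List Int) (t w : Int) :
    (expand_pages pages t w).Pairwise (· < ·) := by
  unfold expand_pages
  have hnd : (pages.foldl (fun s p =>
      (PySem.List.pyRange (-w) (w + 1) 1).foldl (fun s n =>
        let idx := p + n
        if 0 ≤ idx ∧ idx < t then PySem.Set.add s idx else s) s)
      (PySem.Set.empty : PySem.Set Int)).Nodup :=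
    nodupA_outer t w pages _ (by simp [PySem.Set.empty])
  have hle := PySem.List.sorted_pairwise (xs := pages.foldl (fun s p =>
      (PySem.List.pyRange (-w) (w + 1) 1).foldl (fun s n =>
        let idx := p + n
        if 0 ≤ idx ∧ idx < t then PySem.Set.add s idx else s) s)
      (PySem.Set.empty : PySem.Set Int)) (key := fun x => x)
  have hnd' := ((PySem.List.sorted_perm (xs := pages.foldl (fun s p =>
      (PySem.List.pyRange (-w) (w + 1) 1).foldl (fun s n =>
        let idx := p + n
        if 0 ≤ idx ∧ idx < t then PySem.Set.add s idx else s) s)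
      (PySem.Set.empty : PySem.Set Int)) (key := fun x => x) (rev := false)).nodup_iff).mpr hnd
  exact (hle.and hnd').imp (fun h => lt_of_le_of_ne h.1 h.2)

-- every element of a strictly increasing list is ≤ its last element
theorem le_getLast_of_pairwise : ∀ (out : List Int), out.Pairwise (· < ·) →
    ∀ a ∈ out, ∀ last, out.getLast? = some last → a ≤ last := by
  intro out
  induction out with
  | nil => intro _ a ha; simp at ha
  | cons b out ih =>
    intro hp a ha last hlast
    rcases List.mem_cons.mp ha with rfl | ha
    · cases out with
      | nil => simp at hlast; omega
      | cons c out =>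
        have hc : a < c := (List.pairwise_cons.mp hp).1 c (by simp)
        have := ih (List.pairwise_cons.mp hp).2 c (by simp) last (by simpa using hlast)
        omega
    · cases out with
      | nil => simp at ha
      | cons c out =>
        exact ih (List.pairwise_cons.mp hp).2 a ha last (by simpa using hlast)

-- B's loop invariant: the accumulator stays strictly increasing and covers exactly
-- the clipped windows of the processed pages; the third hypothesis says out is
-- downward closed above every future window's lower end.
theorem loopB (t w : Int) :
    ∀ (ps : List Int) (out : List Int),
      ps.Pairwise (· ≤ ·) →
      out.Pairwise (· < ·) →
      (∀ p ∈ ps, ∀ y x, x ∈ out → max (p - w) 0 ≤ y → y ≤ x → y ∈ out) →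
      (ps.foldl (bStep t w) out).Pairwise (· < ·) ∧
      ∀ x, x ∈ ps.foldl (bStep t w) out ↔
        x ∈ out ∨ ∃ p ∈ ps, max (p - w) 0 ≤ x ∧ x ≤ min (p + w) (t - 1) := by
  intro ps
  induction ps with
  | nil => intro out _ hout _; simpa using hout
  | cons p ps ih =>
    intro out hps hout hinv
    have hple : ∀ q ∈ ps, p ≤ q := (List.pairwise_cons.mp hps).1
    set lo := max (p - w) 0 with hlo
    set hi := min (p + w) (t - 1) with hhi
    have hstep : bStep t w out p = out ++ PySem.List.pyRange
        (match out.getLast? with | none => lo | some last => max lo (last + 1)) (hi + 1) 1 := rfl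
    set start := (match out.getLast? with | none => lo | some last => max lo (last + 1)) with hstart
    have hlostart : lo ≤ start := by
      rcases h : out.getLast? with _ | last
      · simp [hstart, h]
      · simp [hstart, h]
    -- a key gap fact: any y with lo ≤ y < start is already in out
    have hgap : ∀ y, lo ≤ y → y < start → y ∈ out := by
      intro y h1 h2
      rcases h : out.getLast? with _ | last
      · simp [hstart, h] at h2; omega
      · simp only [hstart, h] at h2
        have hylast : y ≤ last := by omega
        have hlast : last ∈ out := List.mem_of_getLast? h
        exact hinv p (by simp) y last hlast (by omega) hylast
    -- membership after one step
    have hmem1 : ∀ x, x ∈ bStep t w out p ↔ x ∈ out ∨ (lo ≤ x ∧ x ≤ hi) := by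
      intro x
      rw [hstep]
      simp only [List.mem_append, PySem.List.mem_pyRange_one]
      constructor
      · rintro (hx | hx)
        · exact Or.inl hx
        · exact Or.inr ⟨by omega, by omega⟩
      · rintro (hx | ⟨h1, h2⟩)
        · exact Or.inl hx
        · by_cases hs : start ≤ x
          · exact Or.inr ⟨hs, by omega⟩
          · exact Or.inl (hgap x h1 (by omega))
    -- pairwise after one step
    have hpw1 : (bStep t w out p).Pairwise (· < ·) := by
      rw [hstep]
      refine List.pairwise_append.mpr ⟨hout, PySem.List.pairwise_lt_pyRange_one _ _, ?_⟩
      intro a ha b hb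
      rw [PySem.List.mem_pyRange_one] at hb
      rcases h : out.getLast? with _ | last
      · rw [List.getLast?_eq_none_iff] at h; subst h; simp at ha
      · have := le_getLast_of_pairwise out hout a ha last h
        simp only [hstart, h] at hb
        omega
    -- invariant for the tail
    have hinv1 : ∀ q ∈ ps, ∀ y x, x ∈ bStep t w out p → max (q - w) 0 ≤ y → y ≤ x → y ∈ bStep t w out p := by
      intro q hq y x hx hyq hyx
      have hloq : lo ≤ max (q - w) 0 := by have := hple q hq; omega
      rw [hmem1] at hx ⊢
      rcases hx with hx | ⟨h1, h2⟩
      · exact Or.inl (hinv q (by simp [hq]) y x hx hyq hyx)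
      · by_cases hs : start ≤ y
        · exact Or.inr ⟨by omega, by omega⟩
        · exact Or.inl (hgap y (by omega) (by omega))
    have := ih (bStep t w out p) (List.pairwise_cons.mp hps).2 hpw1 hinv1
    refine ⟨by simpa using this.1, ?_⟩
    intro x
    simp only [List.foldl_cons]
    rw [this.2 x, hmem1]
    constructor
    · rintro (⟨hx | hx⟩ | ⟨q, hq, hx⟩)
      · exact Or.inl hx
      · exact Or.inr ⟨p, by simp, hx⟩
      · exact Or.inr ⟨q, by simp [hq], hx⟩
    · rintro (hx | ⟨q, hq, hx⟩)
      · exact Or.inl (Or.inl hx)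
      · rcases List.mem_cons.mp hq with rfl | hq
        · exact Or.inl (Or.inr hx)
        · exact Or.inr ⟨q, hq, hx⟩

theorem alt_char (pages : List Int) (t w : Int) (hw : 0 ≤ w) :
    (expand_pages_alt pages t w).Pairwise (· < ·) ∧
    ∀ x, x ∈ expand_pages_alt pages t w ↔
      ∃ p ∈ pages, max (p - w) 0 ≤ x ∧ x ≤ min (p + w) (t - 1) := by
  unfold expand_pages_alt
  rw [if_neg (by omega)]
  have := loopB t w (PySem.List.sorted pages (fun x => x) false) []
    (PySem.List.sorted_pairwise pages (fun x => x)) (by simp) (by simp)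
  refine ⟨this.1, fun x => ?_⟩
  rw [this.2 x]
  simp [PySem.List.mem_sorted]

theorem expand_nil_of_neg (pages : List Int) (t w : Int) (hw : w < 0) :
    expand_pages pages t w = [] := by
  rcases List.eq_nil_or_concat (expand_pages pages t w) with h | ⟨l, a, h⟩
  · exact h
  · exfalso
    have : a ∈ expand_pages pages t w := by simp [h]
    rw [mem_expand] at this
    obtain ⟨_, _, p, _, h1, h2⟩ := this
    omega

-- ===== VERDICT (by name: the statement is the Claim_ definition above) =====
theorem expand_pages_spec : Claim_equal_expand_pages := by
  intro pages t w _
  unfold Spec_expand_pages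
  by_cases hw : w < 0
  · rw [expand_nil_of_neg pages t w hw]
    unfold expand_pages_alt
    rw [if_pos hw]
  · have hw' : 0 ≤ w := by omega
    obtain ⟨hpwB, hmemB⟩ := alt_char pages t w hw' 
    have hpwA := pairwise_expand pages t w
    haveI : Std.Antisymm (fun a b : Int => a < b) := ⟨fun a b h1 h2 => absurd h1 (lt_asymm h2)⟩
    refine List.Pairwise.eq_of_mem_iff hpwA hpwB (fun x => ?_)
    rw [mem_expand, hmemB]
    constructor
    · rintro ⟨h1, h2, p, hp, h3, h4⟩
      exact ⟨p, hp, by omega, by omega⟩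
    · rintro ⟨p, hp, h1, h2⟩
      exact ⟨by omega, by omega, p, hp, by omega, by omega⟩
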